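-- pv_equiv track=rewrite | github.com/proboscis/pinjected | pinject_design/di/util.py | _acc_multi_provider
-- ===== SOURCE A (Python) =====
-- def _acc_multi_provider(providers):
--     res = []
--     for p in providers:
--         if p is None:  # this is set by empty_multi_provider call
--             res = []
--         else:
--             res.append(p)
--     return res
-- ===== SOURCE B (Python) =====
-- def _acc_multi_provider(providers):
--     # Scan from the right, collecting elements until the first None, then reverse.
--     ps = list(providers)
--     out = []
--     for p in reversed(ps):
--         if p is None:
--             break
--         out.append(p)
--     out.reverse()
--     return out
-- ===== Notes on version B (the rewrite author's own statement) =====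
-- stated objective: simpler
-- what changed: Instead of folding forward and resetting the accumulator at every None, B scans the list from the right and collects elements until the first None, then reverses the collected suffix.
import Mathlib
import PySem

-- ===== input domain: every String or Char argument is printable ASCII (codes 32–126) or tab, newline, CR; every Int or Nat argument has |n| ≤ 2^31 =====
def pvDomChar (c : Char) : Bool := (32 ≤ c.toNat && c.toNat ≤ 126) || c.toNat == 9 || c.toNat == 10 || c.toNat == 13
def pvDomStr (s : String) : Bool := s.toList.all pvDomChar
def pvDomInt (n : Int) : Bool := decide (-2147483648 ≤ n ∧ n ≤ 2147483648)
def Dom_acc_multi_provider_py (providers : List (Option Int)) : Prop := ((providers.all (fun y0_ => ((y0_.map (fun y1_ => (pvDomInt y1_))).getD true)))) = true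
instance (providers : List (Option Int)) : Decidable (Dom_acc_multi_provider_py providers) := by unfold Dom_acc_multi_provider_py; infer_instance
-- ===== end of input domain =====

-- B replaces A's forward fold (resetting the accumulator at each None) with a
-- right-to-left scan that collects until the first None, then reverses: simpler decomposition.


-- ===== PORT A =====
-- A: res = []; for p in providers: if p is None: res = [] else: res.append(p)
def acc_multi_provider_py (providers : List (Option Int)) : List Int :=
  providers.foldl (fun res p =>
    match p with
    | none => []
    | some v => res ++ [v]) []

-- ===== PORT B =====
-- B helper: collect from the (already reversed) list until the first None.
def accCollectRev : List (Option Int) → List Int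
  | [] => []
  | none :: _ => []
  | some v :: rest => v :: accCollectRev rest

def acc_multi_provider_py_alt (providers : List (Option Int)) : List Int :=
  (accCollectRev providers.reverse).reverse

-- ===== PRECONDITION & SPEC =====
def Spec_acc_multi_provider_py (providers : List (Option Int)) (out : List Int) : Prop := out = acc_multi_provider_py_alt providers
instance (providers : List (Option Int)) (out : List Int) : Decidable (Spec_acc_multi_provider_py providers out) := by unfold Spec_acc_multi_provider_py; infer_instance

-- ===== CLAIM (what is proved, stated in full; the proofs are below) =====
def Claim_equal_acc_multi_provider_py : Prop := ∀ (providers : List (Option Int)), Dom_acc_multi_provider_py providers → Spec_acc_multi_provider_py providers (acc_multi_provider_py providers)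

-- ===== LEMMAS AND PROOFS =====
theorem acc_eq_alt (providers : List (Option Int)) :
    acc_multi_provider_py providers = acc_multi_provider_py_alt providers := by
  induction providers using List.reverseRecOn with
  | nil => rfl
  | append_singleton xs a ih =>
    cases a with
    | none =>
      simp [acc_multi_provider_py, acc_multi_provider_py_alt, accCollectRev]
    | some v =>
      simp only [acc_multi_provider_py, acc_multi_provider_py_alt, List.foldl_append,
        List.foldl_cons, List.foldl_nil, List.reverse_append, List.reverse_cons,
        List.reverse_nil, List.nil_append, List.cons_append, accCollectRev] at *
      simp [ih]

-- ===== VERDICT (by name: the statement is the Claim_ definition above) =====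
theorem acc_multi_provider_py_spec : Claim_equal_acc_multi_provider_py := by
  intro providers _
  unfold Spec_acc_multi_provider_py
  exact acc_eq_alt providers
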